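-- pv_equiv track=rewrite | github.com/dania-sami/DxMoMo | momo_daily_reflection/main.py | analyse_mood
-- ===== SOURCE A (Python) =====
-- import string
-- from typing import List, Dict, Tuple
--
-- POSITIVE_WORDS = {
--     "calm", "grateful", "happy", "good", "hopeful", "relaxed", "progress",
--     "energy", "energised", "energized", "proud", "excited", "okay", "better"
-- }
--
-- NEGATIVE_WORDS = {
--     "tired", "exhausted", "anxious", "worried", "stressed", "overwhelmed",
--     "low", "drained", "sad", "down", "frustrated", "angry", "tense"
-- }
--
-- def analyse_mood(text: str, energy: int) -> Tuple[int, str]: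
--     tokens = [t.strip(string.punctuation) for t in text.split()]
--     pos = sum(1 for t in tokens if t in POSITIVE_WORDS)
--     neg = sum(1 for t in tokens if t in NEGATIVE_WORDS)
--     mood_score = pos - neg + (energy - 3)
--
--     if mood_score >= 2:
--         tone = "positive"
--     elif mood_score <= -2:
--         tone = "strained"
--     else:
--         tone = "neutral"
--     return mood_score, tone
-- ===== SOURCE B (Python) =====
-- import string
--
-- # One combined sentiment table: each positive word maps to +1, each negative to -1.
-- SENTIMENT = {
--     "calm": 1, "grateful": 1, "happy": 1, "good": 1, "hopeful": 1,
--     "relaxed": 1, "progress": 1, "energy": 1, "energised": 1,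
--     "energized": 1, "proud": 1, "excited": 1, "okay": 1, "better": 1,
--     "tired": -1, "exhausted": -1, "anxious": -1, "worried": -1,
--     "stressed": -1, "overwhelmed": -1, "low": -1, "drained": -1,
--     "sad": -1, "down": -1, "frustrated": -1, "angry": -1, "tense": -1,
-- }
--
-- def analyse_mood(text, energy):
--     mood_score = energy - 3
--     for t in text.split():
--         mood_score += SENTIMENT.get(t.strip(string.punctuation), 0)
--     if mood_score >= 2:
--         tone = "positive"
--     elif mood_score <= -2:
--         tone = "strained"
--     else:
--         tone = "neutral"
--     return mood_score, tone
-- ===== Notes on version B (the rewrite author's own statement) =====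
-- stated objective: simpler
-- what changed: Replaces the two independent set-membership counting passes over the token list with one combined word->(+1/-1) sentiment dict and a single pass that accumulates one running net score starting from energy-3.
import Mathlib
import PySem

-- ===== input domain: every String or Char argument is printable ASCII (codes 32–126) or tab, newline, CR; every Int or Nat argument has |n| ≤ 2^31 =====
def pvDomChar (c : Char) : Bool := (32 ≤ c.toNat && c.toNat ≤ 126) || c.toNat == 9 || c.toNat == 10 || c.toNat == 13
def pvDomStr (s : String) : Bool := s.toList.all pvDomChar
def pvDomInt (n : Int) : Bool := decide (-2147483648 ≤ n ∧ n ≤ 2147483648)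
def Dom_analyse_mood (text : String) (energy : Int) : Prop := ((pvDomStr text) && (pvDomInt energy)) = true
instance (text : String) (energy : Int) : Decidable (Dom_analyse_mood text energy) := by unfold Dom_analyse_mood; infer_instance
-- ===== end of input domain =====

-- B replaces A's two membership-counting passes by one combined ±1 sentiment dict and a single
-- running net accumulator (objective: simpler). Exact equivalence is proved on all of Dom.

-- string.punctuation
def pvPunct : String := "!\"#$%&'()*+,-./:;<=>?@[\\]^_`{|}~"

-- ===== PORT A =====
def pvPosWords : PySem.Set String := PySem.Set.ofList
  ["calm", "grateful", "happy", "good", "hopeful", "relaxed", "progress",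
   "energy", "energised", "energized", "proud", "excited", "okay", "better"]

def pvNegWords : PySem.Set String := PySem.Set.ofList
  ["tired", "exhausted", "anxious", "worried", "stressed", "overwhelmed",
   "low", "drained", "sad", "down", "frustrated", "angry", "tense"]

def analyse_mood (text : String) (energy : Int) : Int × String :=
  let tokens := (PySem.Str.split₀ text).map (fun t => PySem.Str.stripChars t pvPunct)
  let pos : Int := tokens.foldl (fun acc t => if PySem.Set.contains pvPosWords t then acc + 1 else acc) 0
  let neg : Int := tokens.foldl (fun acc t => if PySem.Set.contains pvNegWords t then acc + 1 else acc) 0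
  let mood_score := pos - neg + (energy - 3)
  if mood_score ≥ 2 then (mood_score, "positive")
  else if mood_score ≤ -2 then (mood_score, "strained")
  else (mood_score, "neutral")

-- ===== PORT B =====
def pvSentiment : PySem.Dict String Int := PySem.Dict.ofList
  [("calm", 1), ("grateful", 1), ("happy", 1), ("good", 1), ("hopeful", 1),
   ("relaxed", 1), ("progress", 1), ("energy", 1), ("energised", 1),
   ("energized", 1), ("proud", 1), ("excited", 1), ("okay", 1), ("better", 1),
   ("tired", -1), ("exhausted", -1), ("anxious", -1), ("worried", -1),
   ("stressed", -1), ("overwhelmed", -1), ("low", -1), ("drained", -1),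
   ("sad", -1), ("down", -1), ("frustrated", -1), ("angry", -1), ("tense", -1)]

def analyse_mood_alt (text : String) (energy : Int) : Int × String :=
  let mood_score := (PySem.Str.split₀ text).foldl
    (fun acc t => acc + PySem.Dict.getD pvSentiment (PySem.Str.stripChars t pvPunct) 0)
    (energy - 3)
  if mood_score ≥ 2 then (mood_score, "positive")
  else if mood_score ≤ -2 then (mood_score, "strained")
  else (mood_score, "neutral")

-- ===== PRECONDITION & SPEC =====
def Spec_analyse_mood (text : String) (energy : Int) (out : Int × String) : Prop := out = analyse_mood_alt text energy
instance (text : String) (energy : Int) (out : Int × String) : Decidable (Spec_analyse_mood text energy out) := by unfold Spec_analyse_mood; infer_instance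

-- ===== CLAIM (what is proved, stated in full; the proofs are below) =====
def Claim_equal_analyse_mood : Prop := ∀ (text : String) (energy : Int), Dom_analyse_mood text energy → Spec_analyse_mood text energy (analyse_mood text energy)

-- ===== LEMMAS AND PROOFS =====

-- Each token's sentiment value equals its positive indicator minus its negative indicator.
set_option maxRecDepth 4000 in
theorem pv_sent_eq (t : String) :
    PySem.Dict.getD pvSentiment t 0 =
      (if PySem.Set.contains pvPosWords t then (1 : Int) else 0) -
      (if PySem.Set.contains pvNegWords t then (1 : Int) else 0) := by
  by_cases h : t ∈ (["calm", "grateful", "happy", "good", "hopeful", "relaxed", "progress",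
      "energy", "energised", "energized", "proud", "excited", "okay", "better",
      "tired", "exhausted", "anxious", "worried", "stressed", "overwhelmed",
      "low", "drained", "sad", "down", "frustrated", "angry", "tense"] : List String)
  · fin_cases h <;> decide
  · have hmk : pvSentiment = PySem.Dict.mk
        [("calm", 1), ("grateful", 1), ("happy", 1), ("good", 1), ("hopeful", 1),
         ("relaxed", 1), ("progress", 1), ("energy", 1), ("energised", 1),
         ("energized", 1), ("proud", 1), ("excited", 1), ("okay", 1), ("better", 1),
         ("tired", -1), ("exhausted", -1), ("anxious", -1), ("worried", -1),
         ("stressed", -1), ("overwhelmed", -1), ("low", -1), ("drained", -1),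
         ("sad", -1), ("down", -1), ("frustrated", -1), ("angry", -1), ("tense", -1)] := by decide
    simp only [List.mem_cons, List.not_mem_nil, or_false, not_or] at h
    have hk : PySem.Dict.keys pvSentiment =
        ["calm", "grateful", "happy", "good", "hopeful", "relaxed", "progress",
         "energy", "energised", "energized", "proud", "excited", "okay", "better",
         "tired", "exhausted", "anxious", "worried", "stressed", "overwhelmed",
         "low", "drained", "sad", "down", "frustrated", "angry", "tense"] := by decide
    have hc : PySem.Dict.contains pvSentiment t = false := by
      rw [PySem.Dict.contains_eq_decide_mem_keys, hk]; simp [h]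
    simp [PySem.Dict.getD_of_not_contains, hc, pvPosWords, pvNegWords, h]

theorem pv_sum_map_sub (l : List String) (f g h : String → Int)
    (hf : ∀ t, f t = g t - h t) :
    (l.map f).sum = (l.map g).sum - (l.map h).sum := by
  induction l with
  | nil => simp
  | cons a l ih => simp [hf, ih]; ring

theorem pv_count_fold (p : String → Bool) (l : List String) :
    l.foldl (fun acc t => if p t then acc + 1 else acc) (0 : Int) =
      (l.map (fun t => if p t then (1 : Int) else 0)).sum := by
  have := PySem.List.foldl_congr_mem
    (f := fun (acc : Int) t => if p t then acc + 1 else acc)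
    (g := fun (acc : Int) t => acc + (if p t then (1 : Int) else 0))
    (l := l) (init := (0 : Int))
    (by intro acc x _; by_cases hx : p x <;> simp [hx])
  rw [this, PySem.List.foldl_add]; simp

-- ===== VERDICT (by name: the statement is the Claim_ definition above) =====
theorem analyse_mood_spec : Claim_equal_analyse_mood := by
  intro text energy _
  unfold Spec_analyse_mood analyse_mood analyse_mood_alt
  have hscore :
      (PySem.Str.split₀ text).foldl
        (fun acc t => acc + PySem.Dict.getD pvSentiment (PySem.Str.stripChars t pvPunct) 0)
        (energy - 3) =
      ((PySem.Str.split₀ text).map (fun t => PySem.Str.stripChars t pvPunct)).foldl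
          (fun acc t => if PySem.Set.contains pvPosWords t then acc + 1 else acc) (0 : Int) -
        ((PySem.Str.split₀ text).map (fun t => PySem.Str.stripChars t pvPunct)).foldl
          (fun acc t => if PySem.Set.contains pvNegWords t then acc + 1 else acc) (0 : Int) +
        (energy - 3) := by
    rw [PySem.List.foldl_add, pv_count_fold, pv_count_fold, List.map_map, List.map_map]
    rw [pv_sum_map_sub _ _
      (fun t => if PySem.Set.contains pvPosWords (PySem.Str.stripChars t pvPunct) then (1 : Int) else 0)
      (fun t => if PySem.Set.contains pvNegWords (PySem.Str.stripChars t pvPunct) then (1 : Int) else 0)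
      (by intro t; exact pv_sent_eq _)]
    simp only [Function.comp_def]
    ring
  simp only [hscore]
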